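-- pv_equiv track=rewrite | github.com/QuBiit0/QuBot | backend/app/core/context_budget.py | _prune_tool_results
-- ===== SOURCE A (Python) =====
-- SOFT_TRIM_MAX_CHARS = 4_000          # Start soft-trimming above this
--
-- SOFT_TRIM_HEAD_TAIL = 1_500          # Keep this many chars on each side
--
-- HARD_CLEAR_THRESHOLD_CHARS = 50_000  # Hard-clear above this
--
-- PROTECTED_ASSISTANT_TURNS = 3        # Never prune tool results near last N turns
--
-- def soft_trim(text: str, max_chars: int = SOFT_TRIM_MAX_CHARS) -> str:
--     """Trim long text keeping head and tail with a size notice in between."""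
--     if len(text) <= max_chars:
--         return text
--     trimmed = len(text) - 2 * SOFT_TRIM_HEAD_TAIL
--     return (
--         text[:SOFT_TRIM_HEAD_TAIL]
--         + f"\n... [{trimmed:,} chars trimmed] ...\n"
--         + text[-SOFT_TRIM_HEAD_TAIL:]
--     )
--
-- def hard_clear(text: str, threshold: int = HARD_CLEAR_THRESHOLD_CHARS) -> str:
--     """Replace oversized content with a lightweight placeholder."""
--     if len(text) <= threshold:
--         return text
--     return f"[Content cleared — original size: {len(text):,} chars]"
--
-- def _prune_tool_results(messages: list[dict]) -> list[dict]:
--     """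
--     Prune old tool results in-place (returns a new list).
--
--     Protection rules:
--     - Tool results adjacent to the last PROTECTED_ASSISTANT_TURNS
--       assistant messages are never pruned.
--     - Oversized results get soft-trimmed or hard-cleared.
--     """
--     if not messages:
--         return messages
--
--     # Indices of assistant turns (we protect the last N)
--     assistant_idxs = [
--         i for i, m in enumerate(messages) if m.get("role") == "assistant"
--     ]
--     protected_assistants = set(assistant_idxs[-PROTECTED_ASSISTANT_TURNS:])
--
--     # Protect tool results immediately preceding protected assistants
--     protected_tools: set[int] = set()
--     for idx in protected_assistants:
--         for j in range(max(0, idx - 3), idx):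
--             if messages[j].get("role") == "tool":
--                 protected_tools.add(j)
--
--     result: list[dict] = []
--     for i, msg in enumerate(messages):
--         if msg.get("role") != "tool" or i in protected_tools:
--             result.append(msg)
--             continue
--
--         content = msg.get("content", "")
--         if isinstance(content, str):
--             if len(content) > HARD_CLEAR_THRESHOLD_CHARS:
--                 msg = {**msg, "content": hard_clear(content)}
--             elif len(content) > SOFT_TRIM_MAX_CHARS:
--                 msg = {**msg, "content": soft_trim(content)}
--
--         result.append(msg)
--
--     return result
-- ===== SOURCE B (Python) =====
-- SOFT_TRIM_MAX_CHARS = 4_000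
-- SOFT_TRIM_HEAD_TAIL = 1_500
-- HARD_CLEAR_THRESHOLD_CHARS = 50_000
-- PROTECTED_ASSISTANT_TURNS = 3
--
-- def soft_trim(text: str, max_chars: int = SOFT_TRIM_MAX_CHARS) -> str:
--     """Trim long text keeping head and tail with a size notice in between."""
--     if len(text) <= max_chars:
--         return text
--     trimmed = len(text) - 2 * SOFT_TRIM_HEAD_TAIL
--     return (
--         text[:SOFT_TRIM_HEAD_TAIL]
--         + f"\n... [{trimmed:,} chars trimmed] ...\n"
--         + text[-SOFT_TRIM_HEAD_TAIL:]
--     )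
--
-- def hard_clear(text: str, threshold: int = HARD_CLEAR_THRESHOLD_CHARS) -> str:
--     """Replace oversized content with a lightweight placeholder."""
--     if len(text) <= threshold:
--         return text
--     return f"[Content cleared — original size: {len(text):,} chars]"
--
-- def _prune_tool_results(messages: list[dict]) -> list[dict]:
--     """Single backward pass computes protection with a countdown; then one transform pass."""
--     if not messages:
--         return messages
--
--     # Backward pass: an assistant among the last PROTECTED_ASSISTANT_TURNS opens a
--     # 3-position window below it (countdown 4 at the assistant itself).
--     n = len(messages)
--     protected = [False] * n
--     assistants_seen = 0
--     countdown = 0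
--     for i in range(n - 1, -1, -1):
--         role = messages[i].get("role")
--         countdown = countdown - 1 if countdown > 0 else 0
--         if role == "assistant":
--             assistants_seen += 1
--             if assistants_seen <= PROTECTED_ASSISTANT_TURNS:
--                 countdown = max(countdown, 4)
--         elif role == "tool" and countdown > 0:
--             protected[i] = True
--
--     result: list[dict] = []
--     for i, msg in enumerate(messages):
--         if msg.get("role") == "tool" and not protected[i]:
--             content = msg.get("content", "")
--             if isinstance(content, str):
--                 if len(content) > HARD_CLEAR_THRESHOLD_CHARS:
--                     msg = {**msg, "content": hard_clear(content)}
--                 elif len(content) > SOFT_TRIM_MAX_CHARS: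
--                     msg = {**msg, "content": soft_trim(content)}
--         result.append(msg)
--     return result
-- ===== Notes on version B (the rewrite author's own statement) =====
-- stated objective: alternative
-- what changed: A computes the protected tool slots forward in two phases (collect assistant indices, take the last 3, union their max(0,idx-3)..idx windows into a set); B computes the same protection in one backward pass with an assistant counter and a countdown that a last-3 assistant resets, then does the same transform pass.
import Mathlib
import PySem

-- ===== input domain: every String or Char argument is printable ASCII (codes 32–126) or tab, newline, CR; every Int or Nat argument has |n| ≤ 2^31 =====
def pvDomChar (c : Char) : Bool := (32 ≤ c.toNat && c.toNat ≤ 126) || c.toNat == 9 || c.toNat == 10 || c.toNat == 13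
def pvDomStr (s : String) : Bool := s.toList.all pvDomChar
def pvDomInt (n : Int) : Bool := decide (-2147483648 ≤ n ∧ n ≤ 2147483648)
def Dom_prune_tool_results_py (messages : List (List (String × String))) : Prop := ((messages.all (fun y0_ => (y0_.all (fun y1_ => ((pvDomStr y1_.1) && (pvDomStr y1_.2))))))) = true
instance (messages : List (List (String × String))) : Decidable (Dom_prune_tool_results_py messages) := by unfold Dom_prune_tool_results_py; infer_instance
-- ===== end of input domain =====

-- B replaces A's forward two-phase index-list/set construction of protected tool slots by a
-- single backward countdown pass (alternative decomposition, same asymptotic cost).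

-- ===== shared module helpers (soft_trim / hard_clear and m.get("role") == r, used by both Pythons) =====

-- f"{n:,}" for n ≥ 0 (the only way it is called): digits grouped in threes with ','
def commaGroup : List Char → List Char
  | a :: b :: c :: d :: rest => a :: b :: c :: ',' :: commaGroup (d :: rest)
  | l => l

def commaFmt (n : Int) : String := String.ofList ((commaGroup (PySem.Int.toChars n).reverse).reverse)

def hard_clear_py (text : String) (threshold : Int) : String :=
  if PySem.Str.len text ≤ threshold then text
  else "[Content cleared — original size: " ++ commaFmt (PySem.Str.len text) ++ " chars]"

def soft_trim_py (text : String) (max_chars : Int) : String :=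
  if PySem.Str.len text ≤ max_chars then text
  else
    PySem.Str.slice text none (some 1500)
      ++ ("\n... [" ++ commaFmt (PySem.Str.len text - 2 * 1500) ++ " chars trimmed] ...\n")
      ++ PySem.Str.slice text (some (-1500)) none

def isRole (m : List (String × String)) (r : String) : Bool :=
  (PySem.Dict.mk m).get? "role" == some r

-- the shared per-message transform (the content/hard_clear/soft_trim lines, identical in A and B)
def transMsg (m : List (String × String)) : List (String × String) :=
  let content := (PySem.Dict.mk m).getD "content" ""
  if PySem.Str.len content > 50000 then
    ((PySem.Dict.mk m).insert "content" (hard_clear_py content 50000)).items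
  else if PySem.Str.len content > 4000 then
    ((PySem.Dict.mk m).insert "content" (soft_trim_py content 4000)).items
  else m

-- ===== PORT A =====
def assistantIdxs (messages : List (List (String × String))) : List Int :=
  (PySem.List.enumerate messages).filterMap
    (fun im => if isRole im.2 "assistant" then some im.1 else none)

def protectedTools (messages : List (List (String × String))) : PySem.Set Int :=
  let protected_assistants : PySem.Set Int :=
    PySem.Set.ofList (PySem.List.slice (assistantIdxs messages) (some (-3)) none)
  protected_assistants.foldl
    (fun pt idx =>
      (PySem.List.pyRange (max 0 (idx - 3)) idx 1).foldl
        (fun pt j =>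
          if isRole (PySem.List.pyGetD messages j []) "tool" then PySem.Set.add pt j else pt)
        pt)
    PySem.Set.empty

def prune_tool_results_py (messages : List (List (String × String))) : List (List (String × String)) :=
  if messages = [] then messages
  else
    (PySem.List.enumerate messages).foldl
      (fun res im =>
        if !(isRole im.2 "tool") || PySem.Set.contains (protectedTools messages) im.1 then
          res ++ [im.2]
        else res ++ [transMsg im.2])
      []

-- ===== PORT B =====
-- one backward step: decrement the countdown; a last-3 assistant resets it to 4;
-- a tool with positive countdown is protected
def markStep (m : List (String × String)) (st : Nat × Nat × List Bool) : Nat × Nat × List Bool :=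
  let countdown := if 0 < st.2.1 then st.2.1 - 1 else 0
  if isRole m "assistant" then
    let seen := st.1 + 1
    (seen, if seen ≤ 3 then max countdown 4 else countdown, false :: st.2.2)
  else
    (st.1, countdown, (isRole m "tool" && decide (0 < countdown)) :: st.2.2)

def markFold (messages : List (List (String × String))) : Nat × Nat × List Bool :=
  messages.foldr markStep (0, 0, [])

def prune_tool_results_py_alt (messages : List (List (String × String))) : List (List (String × String)) :=
  if messages = [] then messages
  else
    (PySem.List.enumerate messages).foldl
      (fun res im =>
        if isRole im.2 "tool" && !(PySem.List.pyGetD (markFold messages).2.2 im.1 false) then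
          res ++ [transMsg im.2]
        else res ++ [im.2])
      []

-- ===== PRECONDITION & SPEC =====
def Spec_prune_tool_results_py (messages : List (List (String × String))) (out : List (List (String × String))) : Prop := out = prune_tool_results_py_alt messages
instance (messages : List (List (String × String))) (out : List (List (String × String))) : Decidable (Spec_prune_tool_results_py messages out) := by unfold Spec_prune_tool_results_py; infer_instance

-- ===== CLAIM (what is proved, stated in full; the proofs are below) =====
def Claim_equal_prune_tool_results_py : Prop := ∀ (messages : List (List (String × String))), Dom_prune_tool_results_py messages → Spec_prune_tool_results_py messages (prune_tool_results_py messages)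

-- ===== LEMMAS AND PROOFS =====

-- proof-only notions: assistant count, assistant index list, window trigger, countdown value, flag list
def cntA (L : List (List (String × String))) : Nat := L.countP (fun m => isRole m "assistant")

def aidxN : List (List (String × String)) → Nat → List Nat
  | [], _ => []
  | m :: L, s => if isRole m "assistant" then s :: aidxN L (s + 1) else aidxN L (s + 1)

def trigB (L : List (List (String × String))) (k : Nat) : Bool :=
  match L.drop k with
  | [] => false
  | m :: t => isRole m "assistant" && decide (cntA (m :: t) ≤ 3)

def remSpec (L : List (List (String × String))) : Nat :=
  if trigB L 0 then 4 else if trigB L 1 then 3 else if trigB L 2 then 2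
  else if trigB L 3 then 1 else 0

def flagsSpec : List (List (String × String)) → List Bool
  | [] => []
  | m :: L => (isRole m "tool" && decide (2 ≤ remSpec L)) :: flagsSpec L

lemma roles_disjoint (m : List (String × String)) (h : isRole m "assistant" = true) :
    isRole m "tool" = false := by
  simp only [isRole, beq_iff_eq] at h
  simp [isRole, h]

lemma length_aidxN (L : List (List (String × String))) (s : Nat) :
    (aidxN L s).length = cntA L := by
  induction L generalizing s with
  | nil => rfl
  | cons m L ih => unfold aidxN cntA; rw [List.countP_cons]; split <;> simp_all [cntA]

lemma mem_aidxN (L : List (List (String × String))) (s x : Nat) :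
    x ∈ aidxN L s ↔ ∃ t, ∃ _ : t < L.length, x = s + t ∧ isRole L[t] "assistant" = true := by
  induction L generalizing s with
  | nil => simp [aidxN]
  | cons m L ih =>
    unfold aidxN
    by_cases h : isRole m "assistant" = true
    · simp only [h, if_pos, List.mem_cons, ih]
      constructor
      · rintro (rfl | ⟨t, ht, rfl, hA⟩)
        · exact ⟨0, by simp, by omega, by simpa⟩
        · exact ⟨t + 1, by simp; omega, by omega, by simpa⟩
      · rintro ⟨t, ht, rfl, hA⟩
        cases t with
        | zero => left; omega
        | succ t => right; exact ⟨t, by simp at ht; omega, by omega, by simpa using hA⟩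
    · simp only [Bool.not_eq_true] at h
      simp only [h, Bool.false_eq_true, if_false, ih]
      constructor
      · rintro ⟨t, ht, rfl, hA⟩
        exact ⟨t + 1, by simp; omega, by omega, by simpa⟩
      · rintro ⟨t, ht, rfl, hA⟩
        cases t with
        | zero => simp at hA; rw [h] at hA; cases hA
        | succ t => exact ⟨t, by simp at ht; omega, by omega, by simpa using hA⟩

lemma cntA_drop_le (L : List (List (String × String))) (t : Nat) :
    cntA (L.drop t) ≤ cntA L := (List.drop_sublist ..).countP_le

-- KEY: membership in the last-3 slice of the assistant index list
lemma mem_drop_aidxN (L : List (List (String × String))) (s x : Nat) :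
    x ∈ (aidxN L s).drop ((aidxN L s).length - 3) ↔
      ∃ t, ∃ _ : t < L.length, x = s + t ∧ isRole L[t] "assistant" = true ∧
        cntA (L.drop t) ≤ 3 := by
  induction L generalizing s with
  | nil => simp [aidxN]
  | cons m L ih =>
    by_cases h : isRole m "assistant" = true
    · have hcnt : cntA (m :: L) = cntA L + 1 := by
        unfold cntA; rw [List.countP_cons]; simp [h]
      unfold aidxN
      simp only [h, if_pos]
      by_cases hc : cntA L + 1 ≤ 3
      · have : (s :: aidxN L (s+1)).length - 3 = 0 := by
          have := length_aidxN L (s+1); simp [this]; omega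
        rw [this, List.drop_zero]
        simp only [List.mem_cons, mem_aidxN]
        constructor
        · rintro (rfl | ⟨t, ht, rfl, hA⟩)
          · exact ⟨0, by simp, by omega, by simpa, by simpa [hcnt] using hc⟩
          · refine ⟨t + 1, by simp; omega, by omega, by simpa, ?_⟩
            calc cntA ((m :: L).drop (t+1)) ≤ cntA L := by
                  simpa using cntA_drop_le L t
              _ ≤ 3 := by omega
        · rintro ⟨t, ht, rfl, hA, hcle⟩
          cases t with
          | zero => left; omega
          | succ t => right; exact ⟨t, by simp at ht; omega, by omega, by simpa using hA⟩
      · have hlc : (s :: aidxN L (s+1)).length - 3 = ((aidxN L (s+1)).length - 3) + 1 := by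
          have := length_aidxN L (s+1); simp [this]; omega
        rw [hlc, List.drop_succ_cons, ih]
        constructor
        · rintro ⟨t, ht, rfl, hA, hcle⟩
          exact ⟨t + 1, by simp; omega, by omega, by simpa, by simpa using hcle⟩
        · rintro ⟨t, ht, rfl, hA, hcle⟩
          cases t with
          | zero =>
            exfalso; simp only [List.drop_zero] at hcle; omega
          | succ t => exact ⟨t, by simp at ht; omega, by omega, by simpa using hA, by simpa using hcle⟩
    · have hcnt : cntA (m :: L) = cntA L := by
        unfold cntA; rw [List.countP_cons]; simp [h]
      unfold aidxN
      simp only [Bool.not_eq_true] at h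
      simp only [h, Bool.false_eq_true, if_false, ih]
      constructor
      · rintro ⟨t, ht, rfl, hA, hcle⟩
        exact ⟨t + 1, by simp; omega, by omega, by simpa, by simpa using hcle⟩
      · rintro ⟨t, ht, rfl, hA, hcle⟩
        cases t with
        | zero => simp at hA; rw [h] at hA; cases hA
        | succ t => exact ⟨t, by simp at ht; omega, by omega, by simpa using hA, by simpa using hcle⟩

lemma aidx_eq (L : List (List (String × String))) (s : Nat) :
    (PySem.List.enumerate L (s : Int)).filterMap
        (fun im => if isRole im.2 "assistant" then some im.1 else none) =
      (aidxN L s).map Int.ofNat := by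
  induction L generalizing s with
  | nil => simp [aidxN, PySem.List.enumerate_nil]
  | cons m L ih =>
    rw [PySem.List.enumerate_cons, List.filterMap_cons]
    unfold aidxN
    have : ((s : Int) + 1) = ((s + 1 : Nat) : Int) := by push_cast; ring
    rw [this, ih]
    by_cases h : isRole m "assistant" = true <;> simp [h]

-- generic fold-into-set membership
lemma mem_foldl_add (p : Int → Bool) (l : List Int) (s : PySem.Set Int) (x : Int) :
    x ∈ l.foldl (fun s j => if p j then PySem.Set.add s j else s) s ↔
      x ∈ s ∨ (x ∈ l ∧ p x = true) := by
  induction l generalizing s with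
  | nil => simp
  | cons a l ih =>
    simp only [List.foldl_cons, ih, List.mem_cons]
    by_cases h : p a = true
    · simp [h, PySem.Set.mem_add]
      constructor
      · rintro (⟨h1 | rfl⟩ | h2) <;> tauto
      · rintro (h1 | ⟨rfl | h1, h2⟩) <;> tauto
    · simp [h]
      constructor
      · rintro (h1 | h2) <;> tauto
      · rintro (h1 | ⟨rfl | h1, h2⟩) <;> tauto

lemma mem_foldl_union (p : Int → Bool) (rf : Int → List Int) (outer : List Int)
    (s : PySem.Set Int) (x : Int) :
    x ∈ outer.foldl
        (fun s idx => (rf idx).foldl (fun s j => if p j then PySem.Set.add s j else s) s) s ↔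
      x ∈ s ∨ ∃ idx ∈ outer, x ∈ rf idx ∧ p x = true := by
  induction outer generalizing s with
  | nil => simp
  | cons a outer ih =>
    simp only [List.foldl_cons, ih, mem_foldl_add, List.mem_cons]
    constructor
    · rintro ((h | ⟨h1, h2⟩) | ⟨idx, hi, h1, h2⟩)
      · exact Or.inl h
      · exact Or.inr ⟨a, Or.inl rfl, h1, h2⟩
      · exact Or.inr ⟨idx, Or.inr hi, h1, h2⟩
    · rintro (h | ⟨idx, rfl | hi, h1, h2⟩)
      · exact Or.inl (Or.inl h)
      · exact Or.inl (Or.inr ⟨h1, h2⟩)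
      · exact Or.inr ⟨idx, hi, h1, h2⟩

lemma mem_protectedTools (messages : List (List (String × String))) (x : Int) :
    x ∈ protectedTools messages ↔
      ∃ idx ∈ PySem.List.slice (assistantIdxs messages) (some (-3)) none,
        (max 0 (idx - 3) ≤ x ∧ x < idx) ∧
        isRole (PySem.List.pyGetD messages x []) "tool" = true := by
  unfold protectedTools
  simp only []
  rw [mem_foldl_union]
  simp only [PySem.Set.mem_ofList, PySem.List.mem_pyRange_one]
  constructor
  · rintro (h | ⟨idx, h1, h2, h3⟩)
    · cases h
    · exact ⟨idx, h1, h2, h3⟩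
  · rintro ⟨idx, h1, h2, h3⟩
    exact Or.inr ⟨idx, h1, h2, h3⟩

-- A-side characterization of protection
lemma protA_iff (messages : List (List (String × String))) (k : Nat) (hk : k < messages.length) :
    ((k : Int) ∈ protectedTools messages) ↔
      (isRole messages[k] "tool" = true ∧
        ∃ t, ∃ _ : t < messages.length, isRole messages[t] "assistant" = true ∧
          cntA (messages.drop t) ≤ 3 ∧ k < t ∧ t ≤ k + 3) := by
  rw [mem_protectedTools]
  have hgd : PySem.List.pyGetD messages ((k : Int)) ([] : List (String × String)) = messages[k] := by
    rw [PySem.List.pyGetD_natCast, List.getD_eq_getElem _ _ hk]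
  have hslice : PySem.List.slice (assistantIdxs messages) (some (-3)) none =
      (assistantIdxs messages).drop ((assistantIdxs messages).length - 3) :=
    PySem.List.slice_from_neg_ofNat _ 3 (by norm_num)
  have haidx : assistantIdxs messages = (aidxN messages 0).map Int.ofNat := by
    have h := aidx_eq messages 0
    rw [Nat.cast_zero] at h
    exact h
  have hmem_iff : ∀ idx : Int,
      (idx ∈ (assistantIdxs messages).drop ((assistantIdxs messages).length - 3)) ↔
        ∃ t : Nat, ∃ _ : t < messages.length, idx = (t : Int) ∧
          isRole messages[t] "assistant" = true ∧ cntA (messages.drop t) ≤ 3 := by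
    intro idx
    rw [haidx, List.length_map, ← List.map_drop, List.mem_map]
    constructor
    · rintro ⟨x, hx, rfl⟩
      obtain ⟨t, ht, hxe, hA, hc⟩ := (mem_drop_aidxN messages 0 x).mp hx
      exact ⟨t, ht, by rw [hxe]; simp, hA, hc⟩
    · rintro ⟨t, ht, rfl, hA, hc⟩
      exact ⟨t, (mem_drop_aidxN messages 0 t).mpr ⟨t, ht, by omega, hA, hc⟩, rfl⟩
  rw [hslice, hgd]
  constructor
  · rintro ⟨idx, hmem, ⟨hge, hlt⟩, htool⟩
    obtain ⟨t, ht, rfl, hA, hcle⟩ := (hmem_iff idx).mp hmem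
    refine ⟨htool, t, ht, hA, hcle, by omega, by omega⟩
  · rintro ⟨htool, t, ht, hA, hcle, h1, h2⟩
    exact ⟨(t : Int), (hmem_iff _).mpr ⟨t, ht, rfl, hA, hcle⟩, ⟨by omega, by omega⟩, htool⟩

-- B-side invariant
lemma remSpec_le (L : List (List (String × String))) : remSpec L ≤ 4 := by
  unfold remSpec; split_ifs <;> omega

lemma trigB_cons_succ (m : List (String × String)) (L : List (List (String × String))) (k : Nat) :
    trigB (m :: L) (k + 1) = trigB L k := by
  simp [trigB]

lemma trigB_cons_zero (m : List (String × String)) (L : List (List (String × String))) :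
    trigB (m :: L) 0 = (isRole m "assistant" && decide (cntA (m :: L) ≤ 3)) := by
  simp [trigB]

lemma remSpec_cons (m : List (String × String)) (L : List (List (String × String))) :
    remSpec (m :: L) =
      if isRole m "assistant" && decide (cntA (m :: L) ≤ 3) then 4 else remSpec L - 1 := by
  unfold remSpec
  rw [trigB_cons_zero, trigB_cons_succ, trigB_cons_succ, trigB_cons_succ]
  by_cases h : (isRole m "assistant" && decide (cntA (m :: L) ≤ 3)) = true
  · simp [h]
  · simp only [h, Bool.false_eq_true, if_false]
    split_ifs <;> omega

lemma markFold_eq (messages : List (List (String × String))) :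
    markFold messages = (cntA messages, remSpec messages, flagsSpec messages) := by
  induction messages with
  | nil => simp [markFold, cntA, remSpec, trigB, flagsSpec]
  | cons m L ih =>
    have hfold : markFold (m :: L) = markStep m (markFold L) := rfl
    rw [hfold, ih]
    unfold markStep
    simp only
    have hcd : (if 0 < remSpec L then remSpec L - 1 else 0) = remSpec L - 1 := by
      split_ifs <;> omega
    by_cases h : isRole m "assistant" = true
    · have hcnt : cntA (m :: L) = cntA L + 1 := by
        unfold cntA; rw [List.countP_cons]; simp [h]
      have hrem : remSpec (m :: L) = if cntA L + 1 ≤ 3 then 4 else remSpec L - 1 := by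
        rw [remSpec_cons]; simp [h, hcnt]
      have hflag : flagsSpec (m :: L) = false :: flagsSpec L := by
        rw [show flagsSpec (m :: L) = (isRole m "tool" && decide (2 ≤ remSpec L)) :: flagsSpec L from rfl,
          roles_disjoint m h]
        simp
      simp only [h, if_pos, hcd, hflag, hcnt, hrem]
      refine Prod.ext rfl (Prod.ext ?_ rfl)
      simp only
      have hle := remSpec_le L
      split_ifs with h1 <;> omega
    · have hcnt : cntA (m :: L) = cntA L := by
        unfold cntA; rw [List.countP_cons]; simp [h]
      have hrem : remSpec (m :: L) = remSpec L - 1 := by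
        rw [remSpec_cons]; simp [h]
      have hflag : flagsSpec (m :: L) =
          (isRole m "tool" && decide (2 ≤ remSpec L)) :: flagsSpec L := rfl
      simp only [Bool.not_eq_true] at h
      simp only [h, Bool.false_eq_true, if_false, hcd, hflag, hcnt, hrem]
      refine Prod.ext rfl (Prod.ext rfl ?_)
      simp only
      congr 2
      simp only [decide_eq_decide]
      omega

lemma length_flagsSpec (L : List (List (String × String))) : (flagsSpec L).length = L.length := by
  induction L with
  | nil => rfl
  | cons m L ih => simp [flagsSpec, ih]

lemma flagsSpec_getElem (L : List (List (String × String))) (k : Nat) (hk : k < L.length) :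
    (flagsSpec L)[k]'(by rw [length_flagsSpec]; exact hk) =
      (isRole L[k] "tool" && decide (2 ≤ remSpec (L.drop (k + 1)))) := by
  induction L generalizing k with
  | nil => simp at hk
  | cons m L ih =>
    cases k with
    | zero => simp [flagsSpec]
    | succ k => simpa [flagsSpec] using ih k (by simpa using hk)

lemma trigB_iff (L : List (List (String × String))) (k : Nat) :
    trigB L k = true ↔
      ∃ _ : k < L.length, isRole L[k] "assistant" = true ∧ cntA (L.drop k) ≤ 3 := by
  unfold trigB
  rcases hd : L.drop k with _ | ⟨m, t⟩
  · simp only []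
    constructor
    · intro h; cases h
    · rintro ⟨hk, -⟩
      exfalso
      have := List.drop_eq_nil_iff.mp hd
      omega
  · have hk : k < L.length := by
      by_contra h
      rw [List.drop_eq_nil_of_le (by omega)] at hd; cases hd
    have hm : L[k] = m := by
      have h0 : (L.drop k)[0]'(by simp [hd]) = L[k] := by
        rw [List.getElem_drop]; simp
      rw [← h0]; simp [hd]
    have hcnt : cntA (m :: t) = cntA (L.drop k) := by rw [hd]
    simp only [Bool.and_eq_true, decide_eq_true_eq, hm, hcnt]
    constructor
    · rintro ⟨h1, h2⟩; exact ⟨hk, h1, h2⟩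
    · rintro ⟨-, h1, h2⟩; exact ⟨h1, h2⟩

lemma remSpec_ge2_iff (L : List (List (String × String))) :
    2 ≤ remSpec L ↔ (trigB L 0 = true ∨ trigB L 1 = true ∨ trigB L 2 = true) := by
  unfold remSpec; split_ifs <;> simp_all

-- the central bridge: A's protected set and B's flags agree on tool positions
lemma prot_eq_flag (messages : List (List (String × String))) (k : Nat)
    (hk : k < messages.length) (htool : isRole messages[k] "tool" = true) :
    PySem.Set.contains (protectedTools messages) (k : Int) =
      PySem.List.pyGetD (markFold messages).2.2 (k : Int) false := by
  have htr : ∀ j : Nat, trigB (messages.drop (k + 1)) j = true ↔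
      (k + 1 + j < messages.length ∧ isRole (messages.getD (k + 1 + j) []) "assistant" = true ∧
        cntA (messages.drop (k + 1 + j)) ≤ 3) := by
    intro j
    rw [trigB_iff]
    have hlen : (messages.drop (k + 1)).length = messages.length - (k + 1) := by simp
    constructor
    · rintro ⟨hj, h1, h2⟩
      have hjn : k + 1 + j < messages.length := by omega
      have he : (messages.drop (k + 1))[j]'hj = messages[k + 1 + j]'hjn := by
        rw [List.getElem_drop]
      have hd : (messages.drop (k + 1)).drop j = messages.drop (k + 1 + j) := by
        rw [List.drop_drop]
      refine ⟨hjn, ?_, ?_⟩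
      · rw [List.getD_eq_getElem _ _ hjn, ← he]; exact h1
      · rw [← hd]; exact h2
    · rintro ⟨hjn, h1, h2⟩
      have hj : j < (messages.drop (k + 1)).length := by omega
      have he : (messages.drop (k + 1))[j]'hj = messages[k + 1 + j]'hjn := by
        rw [List.getElem_drop]
      have hd : (messages.drop (k + 1)).drop j = messages.drop (k + 1 + j) := by
        rw [List.drop_drop]
      refine ⟨hj, ?_, ?_⟩
      · rw [he]; rw [List.getD_eq_getElem _ _ hjn] at h1; exact h1
      · rw [hd]; exact h2
  rw [markFold_eq]
  simp only []
  have hflen : k < (flagsSpec messages).length := by rw [length_flagsSpec]; exact hk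
  have hgd : PySem.List.pyGetD (flagsSpec messages) ((k : Int)) false =
      (isRole messages[k] "tool" && decide (2 ≤ remSpec (messages.drop (k + 1)))) := by
    rw [PySem.List.pyGetD_natCast, List.getD_eq_getElem _ _ hflen, flagsSpec_getElem messages k hk]
  rw [hgd, htool, Bool.true_and]
  rw [Bool.eq_iff_iff, PySem.Set.contains_iff, protA_iff messages k hk, decide_eq_true_eq,
    remSpec_ge2_iff, htr 0, htr 1, htr 2]
  constructor
  · rintro ⟨-, t, ht, hA, hcle, h1, h2⟩
    have hAd : isRole (messages.getD t []) "assistant" = true := by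
      rw [List.getD_eq_getElem _ _ ht]; exact hA
    have : t = k + 1 + 0 ∨ t = k + 1 + 1 ∨ t = k + 1 + 2 := by omega
    rcases this with rfl | rfl | rfl
    · exact Or.inl ⟨by omega, hAd, hcle⟩
    · exact Or.inr (Or.inl ⟨by omega, hAd, hcle⟩)
    · exact Or.inr (Or.inr ⟨by omega, hAd, hcle⟩)
  · rintro (⟨hjn, h1, h2⟩ | ⟨hjn, h1, h2⟩ | ⟨hjn, h1, h2⟩) <;>
      exact ⟨htool, _, hjn, by rwa [List.getD_eq_getElem _ _ hjn] at h1, h2, by omega, by omega⟩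

-- loop shape: the append-accumulate fold is a map
lemma foldl_if_append {α β : Type} (p : α → Bool) (f g : α → β) (l : List α) (res : List β) :
    l.foldl (fun r x => if p x then r ++ [f x] else r ++ [g x]) res =
      res ++ l.map (fun x => if p x then f x else g x) := by
  induction l generalizing res with
  | nil => simp
  | cons a l ih => simp only [List.foldl_cons, List.map_cons, ih]; split <;> simp

-- ===== VERDICT (by name: the statement is the Claim_ definition above) =====
theorem prune_tool_results_py_spec : Claim_equal_prune_tool_results_py := by
  intro messages _
  unfold Spec_prune_tool_results_py prune_tool_results_py prune_tool_results_py_alt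
  by_cases hnil : messages = []
  · simp [hnil]
  · rw [if_neg hnil, if_neg hnil, foldl_if_append, foldl_if_append]
    simp only [List.nil_append]
    apply List.map_congr_left
    intro im him
    obtain ⟨k, hk, rfl⟩ := (PySem.List.mem_enumerate_iff _ _ _).mp him
    simp only [zero_add]
    by_cases ht : isRole messages[k] "tool" = true
    · rw [prot_eq_flag messages k hk ht]
      cases hfl : PySem.List.pyGetD (markFold messages).2.2 (k : Int) false <;> simp [ht]
    · simp only [Bool.not_eq_true] at ht
      simp [ht]
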